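-- pv_equiv track=rewrite | github.com/Souhaieb-Marzouk/cyberguardian | scanners/file_scanner.py | _count_sequential_runs
-- ===== SOURCE A (Python) =====
-- from typing import Dict, List, Optional, Any, Set, Tuple
--
-- def _count_sequential_runs(bits: List[int]) -> Dict[str, int]:
--     """Count different types of sequential patterns in bit sequence."""
--     runs = {
--         'zeros': 0,
--         'ones': 0,
--         'alternating': 0,
--     }
--
--     if len(bits) < 2:
--         return runs
--
--     current_run = 1
--     last_bit = bits[0]
--     is_alternating = True
--
--     for i in range(1, len(bits)):
--         if bits[i] == last_bit:
--             current_run += 1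
--             is_alternating = False
--         else:
--             if current_run >= 4:
--                 if last_bit == 0:
--                     runs['zeros'] += 1
--                 else:
--                     runs['ones'] += 1
--             current_run = 1
--             last_bit = bits[i]
--
--         # Check alternating pattern
--         if i >= 2 and bits[i] != bits[i-1] and bits[i-1] != bits[i-2]:
--             runs['alternating'] += 1
--
--     return runs
-- ===== SOURCE B (Python) =====
-- def _count_sequential_runs(bits):
--     """Run-length-encode the sequence first, then count with comprehensions."""
--     # closed groups: every maximal run except the trailing one (the original
--     # only counts a run when a different bit terminates it)
--     groups = []
--     cur = None  # open (value, length) group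
--     for b in bits:
--         if cur is not None and cur[0] == b:
--             cur = (cur[0], cur[1] + 1)
--         else:
--             if cur is not None:
--                 groups.append(cur)
--             cur = (b, 1)
--     zeros = sum(1 for v, n in groups if n >= 4 and v == 0)
--     ones = sum(1 for v, n in groups if n >= 4 and v != 0)
--     alternating = sum(1 for x, y, z in zip(bits, bits[1:], bits[2:])
--                       if z != y and y != x)
--     return {'zeros': zeros, 'ones': ones, 'alternating': alternating}
-- ===== Notes on version B (the rewrite author's own statement) =====
-- stated objective: alternative
-- what changed: B first run-length-encodes the sequence into closed groups and counts qualifying groups with comprehensions, and counts alternating triples in a separate zip pass, instead of A's single index loop with interleaved run/alternating bookkeeping.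
import Mathlib
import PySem

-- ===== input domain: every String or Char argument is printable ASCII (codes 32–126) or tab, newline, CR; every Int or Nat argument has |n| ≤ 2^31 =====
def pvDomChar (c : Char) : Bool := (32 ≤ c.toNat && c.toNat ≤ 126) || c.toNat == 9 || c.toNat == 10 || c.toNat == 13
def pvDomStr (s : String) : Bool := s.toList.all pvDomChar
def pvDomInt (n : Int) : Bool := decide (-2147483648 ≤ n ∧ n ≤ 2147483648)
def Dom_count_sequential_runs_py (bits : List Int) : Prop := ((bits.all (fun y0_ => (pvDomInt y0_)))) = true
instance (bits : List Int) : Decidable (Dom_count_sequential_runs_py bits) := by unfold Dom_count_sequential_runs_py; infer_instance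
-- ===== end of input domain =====

-- B replaces A's single stateful index loop by a run-length encoding pass plus
-- separate counting passes; an alternative decomposition of the same O(n) task.


-- ===== PORT A =====
-- A's for-loop over i in range(1, len(bits)); the loop reads bits[i] (the head of
-- `rest`), `last_bit` (= bits[i-1] by the loop's own invariant) and bits[i-2]
-- (carried as `p2`, none while i < 2).  The runs dict has the three fixed keys
-- 'zeros'/'ones'/'alternating'; its three counters are carried as z, o, a and the
-- dict literal is rebuilt at the end in insertion order.  `isAlt` is Python's dead
-- `is_alternating` variable, kept for fidelity.
def aLoop (rest : List Int) (z o a cr lb : Int) (p2 : Option Int) (isAlt : Bool) :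
    Int × Int × Int :=
  match rest with
  | [] => (z, o, a)
  | b :: r =>
    let st : Int × Int × Int × Int × Bool :=
      if b = lb then (z, o, cr + 1, lb, false)
      else
        let zo : Int × Int :=
          if cr ≥ 4 then (if lb = 0 then (z + 1, o) else (z, o + 1)) else (z, o)
        (zo.1, zo.2, 1, b, isAlt)
    let a' : Int :=
      match p2 with
      | some q => if b ≠ lb ∧ lb ≠ q then a + 1 else a
      | none => a
    aLoop r st.1 st.2.1 a' st.2.2.1 st.2.2.2.1 (some lb) st.2.2.2.2

def count_sequential_runs_py (bits : List Int) : List (String × Int) :=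
  match bits with
  | b0 :: b1 :: r =>
    let t := aLoop (b1 :: r) 0 0 0 1 b0 none true
    [("zeros", t.1), ("ones", t.2.1), ("alternating", t.2.2)]
  | _ => [("zeros", 0), ("ones", 0), ("alternating", 0)]  -- len(bits) < 2

-- ===== PORT B =====
-- Source B's RLE loop: state = (closed groups so far, open group or None)
def bStep (st : List (Int × Int) × Option (Int × Int)) (b : Int) :
    List (Int × Int) × Option (Int × Int) :=
  match st.2 with
  | some c => if c.1 = b then (st.1, some (c.1, c.2 + 1)) else (st.1 ++ [c], some (b, 1))
  | none => (st.1, some (b, 1))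

def count_sequential_runs_py_alt (bits : List Int) : List (String × Int) :=
  let groups := (bits.foldl bStep ([], none)).1
  let zeros : Int := groups.countP (fun p => decide (p.2 ≥ 4) && decide (p.1 = 0))
  let ones : Int := groups.countP (fun p => decide (p.2 ≥ 4) && decide (p.1 ≠ 0))
  let alternating : Int :=
    (((bits.zip (bits.drop 1)).zip (bits.drop 2)).countP
      (fun t => decide (t.2 ≠ t.1.2) && decide (t.1.2 ≠ t.1.1)))
  [("zeros", zeros), ("ones", ones), ("alternating", alternating)]

-- ===== PRECONDITION & SPEC =====
def Spec_count_sequential_runs_py (bits : List Int) (out : List (String × Int)) : Prop := out = count_sequential_runs_py_alt bits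
instance (bits : List Int) (out : List (String × Int)) : Decidable (Spec_count_sequential_runs_py bits out) := by unfold Spec_count_sequential_runs_py; infer_instance

-- ===== CLAIM (what is proved, stated in full; the proofs are below) =====
def Claim_equal_count_sequential_runs_py : Prop := ∀ (bits : List Int), Dom_count_sequential_runs_py bits → Spec_count_sequential_runs_py bits (count_sequential_runs_py bits)

-- ===== LEMMAS AND PROOFS =====

-- Int-valued counters over the group list / triple list
def zC (g : List (Int × Int)) : Int :=
  g.countP (fun p => decide (p.2 ≥ 4) && decide (p.1 = 0))

def oC (g : List (Int × Int)) : Int :=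
  g.countP (fun p => decide (p.2 ≥ 4) && decide (p.1 ≠ 0))

def aC (l : List Int) : Int :=
  ((l.zip (l.drop 1)).zip (l.drop 2)).countP
    (fun t => decide (t.2 ≠ t.1.2) && decide (t.1.2 ≠ t.1.1))

def ctx : Option Int → List Int
  | none => []
  | some q => [q]

theorem zC_cons (p : Int × Int) (g : List (Int × Int)) :
    zC (p :: g) = (if p.2 ≥ 4 ∧ p.1 = 0 then (1 : Int) else 0) + zC g := by
  simp only [zC, List.countP_cons, Bool.and_eq_true, decide_eq_true_eq]
  split_ifs <;> push_cast <;> omega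

theorem oC_cons (p : Int × Int) (g : List (Int × Int)) :
    oC (p :: g) = (if p.2 ≥ 4 ∧ p.1 ≠ 0 then (1 : Int) else 0) + oC g := by
  simp only [oC, List.countP_cons, Bool.and_eq_true, decide_eq_true_eq]
  split_ifs <;> push_cast <;> omega

theorem aC_cons (x y z : Int) (r : List Int) :
    aC (x :: y :: z :: r) =
      (if z ≠ y ∧ y ≠ x then (1 : Int) else 0) + aC (y :: z :: r) := by
  simp only [aC, List.drop, List.zip_cons_cons, List.countP_cons, Bool.and_eq_true,
    decide_eq_true_eq]
  split_ifs <;> push_cast <;> omega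

theorem aC_two (x y : Int) : aC [x, y] = 0 := by simp [aC]

theorem aC_one (x : Int) : aC [x] = 0 := by simp [aC]

-- closed groups accumulate on the left of the fold's first component
theorem foldl_bStep_split (rest : List Int) :
    ∀ (g : List (Int × Int)) (c : Int × Int),
      (List.foldl bStep (g, some c) rest).1 =
        g ++ (List.foldl bStep (([] : List (Int × Int)), some c) rest).1 := by
  induction rest with
  | nil => intro g c; simp
  | cons b r ih =>
    intro g c
    by_cases h : c.1 = b
    · simp only [List.foldl_cons, bStep, if_pos h]
      exact ih g (c.1, c.2 + 1)
    · simp only [List.foldl_cons, bStep, if_neg h]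
      rw [ih (g ++ [c]) (b, 1), ih ([] ++ [c]) (b, 1)]
      simp

-- main loop invariant: A's loop = counters plus B-style counts of what remains
theorem aLoop_eq (rest : List Int) :
    ∀ (z o a cr lb : Int) (p2 : Option Int) (isAlt : Bool),
      aLoop rest z o a cr lb p2 isAlt =
        ( z + zC (List.foldl bStep (([] : List (Int × Int)), some (lb, cr)) rest).1,
          o + oC (List.foldl bStep (([] : List (Int × Int)), some (lb, cr)) rest).1,
          a + aC (ctx p2 ++ lb :: rest) ) := by
  induction rest with
  | nil =>
    intro z o a cr lb p2 isAlt
    cases p2 <;> simp [aLoop, zC, oC, ctx, aC_one, aC_two]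
  | cons b r ih =>
    intro z o a cr lb p2 isAlt
    by_cases h : b = lb
    · subst h
      have hfold :
          List.foldl bStep (([] : List (Int × Int)), some (b, cr)) (b :: r) =
            List.foldl bStep (([] : List (Int × Int)), some (b, cr + 1)) r := by
        simp [bStep]
      simp only [aLoop, if_pos rfl]
      rw [ih, hfold]
      cases p2 with
      | none => simp [ctx]
      | some q =>
        simp only [ctx, List.cons_append, List.nil_append]
        rw [aC_cons]
        simp
    · have hfold :
          (List.foldl bStep (([] : List (Int × Int)), some (lb, cr)) (b :: r)).1 =
            (lb, cr) :: (List.foldl bStep (([] : List (Int × Int)), some (b, 1)) r).1 := by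
        simp only [List.foldl_cons, bStep]
        rw [if_neg (fun hh => h hh.symm)]
        rw [foldl_bStep_split r ([] ++ [(lb, cr)]) (b, 1)]
        simp
      simp only [aLoop, if_neg h]
      rw [ih, hfold, zC_cons, oC_cons]
      cases p2 with
      | none =>
        simp only [ctx, List.nil_append, Prod.mk.injEq]
        refine ⟨?_, ?_, rfl⟩
        · split_ifs <;> simp_all <;> omega
        · split_ifs <;> simp_all <;> omega
      | some q =>
        simp only [ctx, List.cons_append, List.nil_append, Prod.mk.injEq]
        rw [aC_cons]
        refine ⟨?_, ?_, ?_⟩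
        · split_ifs <;> simp_all <;> omega
        · split_ifs <;> simp_all <;> omega
        · split_ifs <;> simp_all <;> omega

-- ===== VERDICT (by name: the statement is the Claim_ definition above) =====
theorem count_sequential_runs_py_spec : Claim_equal_count_sequential_runs_py := by
  intro bits _
  unfold Spec_count_sequential_runs_py
  match bits with
  | [] => rfl
  | [b] => simp [count_sequential_runs_py, count_sequential_runs_py_alt, bStep]
  | b0 :: b1 :: r =>
    show count_sequential_runs_py (b0 :: b1 :: r) = count_sequential_runs_py_alt (b0 :: b1 :: r)
    simp only [count_sequential_runs_py, count_sequential_runs_py_alt]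
    rw [aLoop_eq]
    simp only [ctx, List.nil_append]
    have hfold :
        (List.foldl bStep (([] : List (Int × Int)), none) (b0 :: b1 :: r)).1 =
          (List.foldl bStep (([] : List (Int × Int)), some (b0, 1)) (b1 :: r)).1 := by
      simp [bStep]
    rw [← hfold]
    simp [zC, oC, aC]
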